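-- pv_equiv track=rewrite | github.com/prajwalshettydev/UnrealGenAISupport | Content/Python/layout_engine.py | _ring_candidates
-- ===== SOURCE A (Python) =====
-- def _ring_candidates(
--     gx: int, gy: int, radius: int, bias: str
-- ) -> list[tuple[int, int]]:
--     """All grid cells at Manhattan distance == radius, sorted by placement bias."""
--     cells = [
--         (gx + dx, gy + dy)
--         for dx in range(-radius, radius + 1)
--         for dy in range(-radius, radius + 1)
--         if abs(dx) + abs(dy) == radius
--     ]
--     if bias == "append_right":
--         cells.sort(key=lambda c: (-c[0], abs(c[1] - gy)))
--     elif bias == "insert_between":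
--         cells.sort(key=lambda c: (abs(c[0] - gx), abs(c[1] - gy)))
--     elif bias == "side_branch":
--         cells.sort(key=lambda c: (abs(c[1] - gy), -c[0]))
--     return cells
-- ===== SOURCE B (Python) =====
-- def _ring_candidates(
--     gx: int, gy: int, radius: int, bias: str
-- ) -> list[tuple[int, int]]:
--     """All grid cells at Manhattan distance == radius, sorted by placement bias.
--
--     O(radius) enumeration: for each dx the only candidates are dy = +-(radius-|dx|),
--     instead of scanning the whole (2r+1)x(2r+1) square."""
--     cells = []
--     for dx in range(-radius, radius + 1):
--         m = radius - abs(dx)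
--         x = gx + dx
--         if m == 0:
--             cells.append((x, gy))
--         else:
--             cells.append((x, gy - m))
--             cells.append((x, gy + m))
--     key_makers = {
--         "append_right": lambda c: (-c[0], abs(c[1] - gy)),
--         "insert_between": lambda c: (abs(c[0] - gx), abs(c[1] - gy)),
--         "side_branch": lambda c: (abs(c[1] - gy), -c[0]),
--     }
--     key = key_makers.get(bias)
--     return sorted(cells, key=key) if key else cells
-- ===== Notes on version B (the rewrite author's own statement) =====
-- stated objective: faster
-- what changed: Instead of scanning the whole (2r+1)x(2r+1) square and filtering by Manhattan distance, B enumerates only the ring cells directly (dy = +-(radius-|dx|) for each dx) before the same stable bias sort.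
import Mathlib
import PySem

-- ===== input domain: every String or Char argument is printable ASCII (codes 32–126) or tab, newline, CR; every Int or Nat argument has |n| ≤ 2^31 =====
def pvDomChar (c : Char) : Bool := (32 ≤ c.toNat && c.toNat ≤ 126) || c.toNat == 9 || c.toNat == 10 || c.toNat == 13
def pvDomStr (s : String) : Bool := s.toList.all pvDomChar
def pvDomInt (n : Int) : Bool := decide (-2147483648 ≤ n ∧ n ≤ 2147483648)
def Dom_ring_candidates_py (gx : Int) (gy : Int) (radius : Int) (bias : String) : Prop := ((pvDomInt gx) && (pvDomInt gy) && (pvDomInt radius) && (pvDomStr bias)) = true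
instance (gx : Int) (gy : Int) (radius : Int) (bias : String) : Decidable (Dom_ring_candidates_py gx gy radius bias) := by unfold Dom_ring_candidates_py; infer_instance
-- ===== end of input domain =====

-- B replaces A's O(radius^2) scan of the whole (2r+1)×(2r+1) square by a direct
-- O(radius) enumeration of the ring cells (dy = ±(radius-|dx|)), then the same stable bias sort.

-- ===== PORT A =====
-- the nested list comprehension: for dx in range(-r, r+1) for dy in range(-r, r+1) if |dx|+|dy| == r
def pvCellsA (gx : Int) (gy : Int) (radius : Int) : List (Int × Int) :=
  (PySem.List.pyRange (-radius) (radius + 1) 1).flatMap (fun dx =>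
    ((PySem.List.pyRange (-radius) (radius + 1) 1).filter
        (fun dy => |dx| + |dy| == radius)).map (fun dy => (gx + dx, gy + dy)))

def ring_candidates_py (gx : Int) (gy : Int) (radius : Int) (bias : String) : List (Int × Int) :=
  let cells := pvCellsA gx gy radius
  if bias == "append_right" then
    PySem.List.sorted2 cells (fun c => -c.1) (fun c => |c.2 - gy|)
  else if bias == "insert_between" then
    PySem.List.sorted2 cells (fun c => |c.1 - gx|) (fun c => |c.2 - gy|)
  else if bias == "side_branch" then
    PySem.List.sorted2 cells (fun c => |c.2 - gy|) (fun c => -c.1)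
  else cells

-- ===== PORT B =====
-- the single loop 'for dx in range(-r, r+1): m = r - |dx|; append (x, gy) or (x, gy-m), (x, gy+m)'
def pvCellsB (gx : Int) (gy : Int) (radius : Int) : List (Int × Int) :=
  (PySem.List.pyRange (-radius) (radius + 1) 1).foldl
    (fun acc dx =>
      acc ++ (let m := radius - |dx|
              let x := gx + dx
              if m = 0 then [(x, gy)] else [(x, gy - m), (x, gy + m)])) []

-- the 'key_makers' dict: which (k1, k2) sort key each bias names
def pvKeyMakers (gx : Int) (gy : Int) : PySem.Dict String ((Int × Int → Int) × (Int × Int → Int)) :=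
  PySem.Dict.mk  -- dict literal with three distinct string keys
    [("append_right", (fun c => -c.1, fun c => |c.2 - gy|)),
     ("insert_between", (fun c => |c.1 - gx|, fun c => |c.2 - gy|)),
     ("side_branch", (fun c => |c.2 - gy|, fun c => -c.1))]

def ring_candidates_py_alt (gx : Int) (gy : Int) (radius : Int) (bias : String) : List (Int × Int) :=
  let cells := pvCellsB gx gy radius
  match (pvKeyMakers gx gy).get? bias with
  | none => cells
  | some (k1, k2) => PySem.List.sorted2 cells k1 k2

-- ===== PRECONDITION & SPEC =====
def Spec_ring_candidates_py (gx : Int) (gy : Int) (radius : Int) (bias : String) (out : List (Int × Int)) : Prop := out = ring_candidates_py_alt gx gy radius bias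
instance (gx : Int) (gy : Int) (radius : Int) (bias : String) (out : List (Int × Int)) : Decidable (Spec_ring_candidates_py gx gy radius bias out) := by unfold Spec_ring_candidates_py; infer_instance

-- ===== CLAIM (what is proved, stated in full; the proofs are below) =====
def Claim_equal_ring_candidates_py : Prop := ∀ (gx : Int) (gy : Int) (radius : Int) (bias : String), Dom_ring_candidates_py gx gy radius bias → Spec_ring_candidates_py gx gy radius bias (ring_candidates_py gx gy radius bias)

-- ===== LEMMAS AND PROOFS =====

-- a row segment none of whose elements has |dy| = m filters to nothing
lemma pv_filter_none (a b m : Int) (h : ∀ x, a ≤ x → x < b → ¬ |x| = m) :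
    (PySem.List.pyRange a b 1).filter (fun dy => decide (|dy| = m)) = [] := by
  apply List.filter_eq_nil_iff.mpr
  intro x hx
  rw [PySem.List.mem_pyRange_one] at hx
  simp [h x hx.1 hx.2]

-- filtering the full row range(-r, r+1) by |dy| = m keeps exactly -m and m (just 0 when m = 0)
lemma pv_filter_abs (r m : Int) (h0 : 0 ≤ m) (hm : m ≤ r) :
    (PySem.List.pyRange (-r) (r + 1) 1).filter (fun dy => decide (|dy| = m)) =
      if m = 0 then [(0 : Int)] else [-m, m] := by
  by_cases hm0 : m = 0
  · subst hm0
    rw [PySem.List.pyRange_one_append (-r) 0 (r + 1) (by omega) (by omega),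
      PySem.List.pyRange_one_cons (show (0 : Int) < r + 1 by omega), List.filter_append]
    rw [pv_filter_none (-r) 0 0 (by intro x hx1 hx2 hc; rcases abs_cases x with ⟨he, _⟩ | ⟨he, _⟩ <;> omega)]
    simp
    intro x hx1 hx2
    omega
  · have hmp : 0 < m := lt_of_le_of_ne h0 (Ne.symm hm0)
    rw [PySem.List.pyRange_one_append (-r) (-m) (r + 1) (by omega) (by omega),
      PySem.List.pyRange_one_cons (show -m < r + 1 by omega),
      PySem.List.pyRange_one_append (-m + 1) m (r + 1) (by omega) (by omega),
      PySem.List.pyRange_one_cons (show m < r + 1 by omega), List.filter_append]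
    rw [pv_filter_none (-r) (-m) m (by intro x hx1 hx2 hc; rcases abs_cases x with ⟨he, _⟩ | ⟨he, _⟩ <;> omega)]
    simp [pv_filter_none (-m + 1) m m (by intro x hx1 hx2 hc; rcases abs_cases x with ⟨he, _⟩ | ⟨he, _⟩ <;> omega),
      pv_filter_none (m + 1) (r + 1) m (by intro x hx1 hx2 hc; rcases abs_cases x with ⟨he, _⟩ | ⟨he, _⟩ <;> omega),
      List.filter_append, abs_of_nonneg (le_of_lt hmp), abs_of_nonpos (by omega : -m ≤ 0), hm0]

-- the inner comprehension over dy collapses to B's per-dx cell list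
lemma pv_inner (gx gy r dx : Int) (h1 : -r ≤ dx) (h2 : dx ≤ r) :
    ((PySem.List.pyRange (-r) (r + 1) 1).filter
        (fun dy => |dx| + |dy| == r)).map (fun dy => (gx + dx, gy + dy)) =
      (let m := r - |dx|
       let x := gx + dx
       if m = 0 then [(x, gy)] else [(x, gy - m), (x, gy + m)]) := by
  have habs : 0 ≤ |dx| := abs_nonneg dx
  have habs2 : |dx| ≤ r := abs_le.mpr ⟨by omega, h2⟩
  rw [List.filter_congr (fun dy _ => show (|dx| + |dy| == r) = decide (|dy| = r - |dx|) by
    by_cases h : |dy| = r - |dx| <;> simp [h] <;> omega)]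
  rw [pv_filter_abs r (r - |dx|) (by omega) (by omega)]
  split_ifs with h <;> (simp [sub_eq_add_neg]; omega)

lemma pv_cells_eq (gx gy r : Int) : pvCellsA gx gy r = pvCellsB gx gy r := by
  unfold pvCellsA pvCellsB
  rw [PySem.List.foldl_append_eq_flatMap]
  rw [List.nil_append]
  apply List.flatMap_congr
  intro dx hdx
  rw [PySem.List.mem_pyRange_one] at hdx
  exact pv_inner gx gy r dx hdx.1 (by omega)

-- ===== VERDICT (by name: the statement is the Claim_ definition above) =====
theorem ring_candidates_py_spec : Claim_equal_ring_candidates_py := by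
  intro gx gy radius bias _
  unfold Spec_ring_candidates_py ring_candidates_py ring_candidates_py_alt
  rw [pv_cells_eq]
  by_cases h1 : bias = "append_right"
  · subst h1; rfl
  by_cases h2 : bias = "insert_between"
  · subst h2; rfl
  by_cases h3 : bias = "side_branch"
  · subst h3; rfl
  simp [pvKeyMakers, h1, h2, h3, Ne.symm h1, Ne.symm h2, Ne.symm h3, PySem.Dict.get?]
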